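-- pv_equiv track=rewrite | github.com/alexandraback/datacollection | solutions_5688567749672960_0/Python/Lutyj/program.py | calc
-- ===== SOURCE A (Python) =====
-- def calc(N):
--     if N < 10:
--         return N
--
--     if (N % 10 == 0):
--         return calc(N - 1) + 1
--
--     NS = str(N)
--     L = len(NS)
--     N10 = int('1' + '0' * (L - 1))
--
--     result = calc(N10)
--
--     rev = 0
--     for i in range(L):
--         rev += 10 ** min(i, L - i - 1) * int(NS[i])
--
--     return result + min(rev, N - N10)
-- ===== SOURCE B (Python) =====
-- def calc(N):
--     if N < 10:
--         return N
--     acc = 0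
--     if N % 10 == 0:
--         acc = 1
--         N -= 1
--     while N >= 10:
--         s = str(N)
--         L = len(s)
--         p = 10 ** (L - 1)
--         rev = sum(10 ** min(i, L - i - 1) * int(c) for i, c in enumerate(s))
--         acc += min(rev, N - p) + 1
--         N = p - 1
--     return acc + N
-- ===== Notes on version B (the rewrite author's own statement) =====
-- stated objective: alternative
-- what changed: The two-branch recursion (trailing-zero bump and descent to the power-of-ten predecessor) is replaced by a single iterative while-loop over decreasing magnitudes 10^k-1 with a running accumulator: the %10==0 bump is folded into a one-time pre-step and a per-level +1, and no call stack is used.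
import Mathlib
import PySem

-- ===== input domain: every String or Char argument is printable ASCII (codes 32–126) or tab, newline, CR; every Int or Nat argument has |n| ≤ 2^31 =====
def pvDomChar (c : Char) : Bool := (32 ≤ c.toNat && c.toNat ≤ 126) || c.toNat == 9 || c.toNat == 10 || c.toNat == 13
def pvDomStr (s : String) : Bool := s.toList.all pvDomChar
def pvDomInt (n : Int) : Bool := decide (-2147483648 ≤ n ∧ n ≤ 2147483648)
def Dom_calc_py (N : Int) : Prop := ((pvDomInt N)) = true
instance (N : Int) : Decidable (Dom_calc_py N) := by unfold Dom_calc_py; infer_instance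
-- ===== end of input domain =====

-- B replaces A's two-branch recursion by one while-loop over decreasing magnitudes with a
-- running accumulator (same values, no call stack); objective: alternative decomposition.

-- ===== PORT A =====
-- A's recursion, ported with a fuel parameter (N.toNat + 1 exceeds the real call depth);
-- the fuel is only a totality guard, every step is A's code.
def calcGo : Nat → Int → Int
  | 0, _ => 0
  | f + 1, N =>
    if N < 10 then N
    else if PySem.Int.mod N 10 = 0 then calcGo f (N - 1) + 1
    else
      -- NS = str(N)  (kept as its character list; all uses are len/indexing)
      let NS := PySem.Int.toChars N
      let L : Int := PySem.List.len NS
      -- N10 = int('1' + '0' * (L - 1)); the parse never fails here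
      let N10 := (PySem.Int.ofChars? ('1' :: List.replicate (L - 1).toNat '0')).getD 0
      let result := calcGo f N10
      let rev := (PySem.List.pyRange 0 L 1).foldl
        (fun acc i => acc + 10 ^ (min i (L - i - 1)).toNat *
          (PySem.Int.ofChars? [PySem.List.pyGetD NS i ' ']).getD 0) 0
      result + min rev (N - N10)

def calc_py (N : Int) : Int := calcGo (N.toNat + 1) N

-- ===== PORT B =====
-- the while-loop of Source B, with fuel as totality guard (N.toNat bounds the iteration count)
def altLoop : Nat → Int → Int → Int
  | 0, N, acc => acc + N
  | f + 1, N, acc =>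
    if N < 10 then acc + N
    else
      let s := PySem.Int.toChars N
      let L : Int := PySem.List.len s
      let p : Int := 10 ^ (L - 1).toNat
      let rev := (PySem.List.enumerate s 0).foldl
        (fun a ic => a + 10 ^ (min ic.1 (L - ic.1 - 1)).toNat *
          (PySem.Int.ofChars? [ic.2]).getD 0) 0
      altLoop f (p - 1) (acc + min rev (N - p) + 1)

def calc_py_alt (N : Int) : Int :=
  if N < 10 then N
  else if PySem.Int.mod N 10 = 0 then altLoop N.toNat (N - 1) 1
  else altLoop N.toNat N 0

-- ===== PRECONDITION & SPEC =====
def Spec_calc_py (N : Int) (out : Int) : Prop := out = calc_py_alt N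
instance (N : Int) (out : Int) : Decidable (Spec_calc_py N out) := by unfold Spec_calc_py; infer_instance

-- ===== CLAIM (what is proved, stated in full; the proofs are below) =====
def Claim_equal_calc_py : Prop := ∀ (N : Int), Dom_calc_py N → Spec_calc_py N (calc_py N)

-- ===== LEMMAS AND PROOFS =====

-- str(n) for n > 0 is the base-10 digit characters, most significant first
lemma toDigitsCore_eq_digits (f : Nat) : ∀ (n : Nat) (acc : List Char), 0 < n → n < f →
    Nat.toDigitsCore 10 f n acc = ((Nat.digits 10 n).map Nat.digitChar).reverse ++ acc := by
  induction f with
  | zero => intro n acc h1 h2; omega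
  | succ f ih =>
    intro n acc h1 h2
    rw [Nat.toDigitsCore]
    by_cases hd : n / 10 = 0
    · have hn10 : n < 10 := by omega
      rw [Nat.digits_def' (by norm_num : 1 < 10) h1]
      simp [hd, Nat.mod_eq_of_lt hn10]
    · simp only [hd, if_false]
      rw [ih (n / 10) _ (by omega) (by omega)]
      rw [Nat.digits_def' (by norm_num : 1 < 10) h1]
      simp

lemma toChars_pos (N : Int) (h : 0 < N) :
    PySem.Int.toChars N = ((Nat.digits 10 N.toNat).map Nat.digitChar).reverse := by
  rw [PySem.Int.toChars]
  rw [if_neg (by omega)]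
  rw [Nat.toDigits, toDigitsCore_eq_digits _ _ _ (by omega) (by omega)]
  simp

lemma parse_pow (k : Nat) (h1 : 1 ≤ k) (h9 : k ≤ 9) :
    PySem.Int.ofChars? ('1' :: List.replicate k '0') = some ((10 : Int) ^ k) := by
  interval_cases k <;> decide

-- the shape facts for one level: digit count, the parsed power of ten, and its bounds
lemma shape_facts (N : Int) (h10 : 10 ≤ N) (hB : N ≤ 2147483648) :
    ∃ k : Nat, 1 ≤ k ∧ k ≤ 9 ∧
      (PySem.List.len (PySem.Int.toChars N) : Int) = (k + 1 : Nat) ∧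
      PySem.Int.ofChars? ('1' :: List.replicate k '0') = some ((10 : Int) ^ k) ∧
      (10 : Int) ^ k ≤ N ∧ N < (10 : Int) ^ (k + 1) := by
  set n := N.toNat with hn
  have hn10 : 10 ≤ n := by omega
  have hNn : (n : Int) = N := by omega
  have hnB : n < 10 ^ 10 := by omega
  set Ln := (Nat.digits 10 n).length with hL
  have h2 : 2 ≤ Ln := by
    have := (Nat.lt_digits_length_iff (b := 10) (k := 1) (by norm_num) n).mpr (by simpa using hn10)
    omega
  have hle : Ln ≤ 10 := by
    rw [hL, Nat.digits_length_le_iff (by norm_num : 1 < 10)]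
    exact hnB
  have hlow : 10 ^ (Ln - 1) ≤ n :=
    (Nat.lt_digits_length_iff (by norm_num) n).mp (show Ln - 1 < Ln by omega)
  have hhigh : n < 10 ^ Ln :=
    (Nat.digits_length_le_iff (by norm_num) n).mp (le_refl _)
  have hEq : Ln - 1 + 1 = Ln := by omega
  refine ⟨Ln - 1, by omega, by omega, ?_, parse_pow _ (by omega) (by omega), ?_, ?_⟩
  · rw [toChars_pos N (by omega)]
    simp [PySem.List.len_eq, ← hn, ← hL]
    omega
  · have h := Nat.cast_le (α := Int) |>.mpr hlow
    rw [hNn] at h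
    exact_mod_cast h
  · have h := Nat.cast_lt (α := Int) |>.mpr hhigh
    rw [hNn] at h
    rw [hEq]
    exact_mod_cast h

-- B's rev (over enumerate) equals A's rev (over range + indexing)
lemma rev_eq (s : List Char) (L : Int) :
    (PySem.List.enumerate s 0).foldl
      (fun a ic => a + 10 ^ (min ic.1 (L - ic.1 - 1)).toNat *
        (PySem.Int.ofChars? [ic.2]).getD 0) 0 =
    (PySem.List.pyRange 0 (PySem.List.len s) 1).foldl
      (fun acc i => acc + 10 ^ (min i (L - i - 1)).toNat *
        (PySem.Int.ofChars? [PySem.List.pyGetD s i ' ']).getD 0) 0 := by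
  rw [PySem.List.enumerate_eq_map_pyRange s ' ', List.foldl_map]

lemma ten_le_pow (k : Nat) (h1 : 1 ≤ k) : (10 : Int) ≤ 10 ^ k := by
  calc (10 : Int) = 10 ^ 1 := by norm_num
  _ ≤ 10 ^ k := pow_le_pow_right₀ (by norm_num) h1

lemma mod_pow_ten (k : Nat) (h1 : 1 ≤ k) : PySem.Int.mod ((10 : Int) ^ k) 10 = 0 := by
  rw [PySem.Int.mod_eq_zero_iff_dvd]
  exact dvd_pow_self 10 (by omega)

lemma mod_pred_pow_ten (k : Nat) (h1 : 1 ≤ k) : PySem.Int.mod ((10 : Int) ^ k - 1) 10 ≠ 0 := by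
  intro h
  rw [PySem.Int.mod_eq_zero_iff_dvd] at h
  have h2 : (10 : Int) ∣ 10 ^ k := dvd_pow_self 10 (by omega)
  have h3 : (10 : Int) ∣ 1 := by simpa using dvd_sub h2 h
  norm_num at h3

-- any sufficient fuel computes A's value
lemma calcGo_fuel (n : Nat) : ∀ (N : Int) (f : Nat), N.toNat ≤ n → N ≤ 2147483648 →
    N.toNat < f → calcGo f N = calc_py N := by
  induction n using Nat.strong_induction_on with
  | _ n IH =>
    intro N f hn hB hf
    obtain ⟨f, rfl⟩ : ∃ f', f = f' + 1 := ⟨f - 1, by omega⟩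
    rw [calc_py]
    by_cases hlt : N < 10
    · simp only [calcGo, if_pos hlt]
    · push Not at hlt
      by_cases hmod : PySem.Int.mod N 10 = 0
      · simp only [calcGo, if_neg (by omega : ¬ N < 10), if_pos hmod]
        rw [IH (N - 1).toNat (by omega) (N - 1) f (le_refl _) (by omega) (by omega)]
        rw [IH (N - 1).toNat (by omega) (N - 1) N.toNat (le_refl _) (by omega) (by omega)]
      · obtain ⟨k, hk1, hk9, hlen, hparse, hlowk, hhighk⟩ := shape_facts N hlt hB
        simp only [calcGo, if_neg (by omega : ¬ N < 10), if_neg hmod]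
        rw [hlen]
        have hk' : (((k + 1 : Nat) : Int) - 1).toNat = k := by push_cast; omega
        rw [hk', hparse]
        simp only [Option.getD_some]
        have hp0 : (0 : Int) < 10 ^ k := by positivity
        have hpN : (10 : Int) ^ k < N := by
          rcases lt_or_eq_of_le hlowk with h | h
          · exact h
          · exact absurd (h ▸ mod_pow_ten k hk1) hmod
        rw [IH ((10 : Int) ^ k).toNat (by omega) _ f (le_refl _) (by omega) (by omega)]
        rw [IH ((10 : Int) ^ k).toNat (by omega) _ N.toNat (le_refl _) (by omega) (by omega)]

-- the loop of B, run from a non-multiple of 10, adds exactly A's value to the accumulator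
lemma altLoop_eq (n : Nat) : ∀ (N : Int) (f : Nat) (acc : Int), N.toNat ≤ n → 10 ≤ N →
    N ≤ 2147483648 → PySem.Int.mod N 10 ≠ 0 → N.toNat ≤ f →
    altLoop f N acc = acc + calc_py N := by
  induction n using Nat.strong_induction_on with
  | _ n IH =>
    intro N f acc hn h10 hB hmod hf
    obtain ⟨f, rfl⟩ : ∃ f', f = f' + 1 := ⟨f - 1, by omega⟩
    obtain ⟨k, hk1, hk9, hlen, hparse, hlowk, hhighk⟩ := shape_facts N h10 hB
    have hp0 : (0 : Int) < 10 ^ k := by positivity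
    have hp10 : (10 : Int) ≤ 10 ^ k := ten_le_pow k hk1
    have hpN : (10 : Int) ^ k < N := by
      rcases lt_or_eq_of_le hlowk with h | h
      · exact h
      · exact absurd (h ▸ mod_pow_ten k hk1) hmod
    have hk' : (((k + 1 : Nat) : Int) - 1).toNat = k := by push_cast; omega
    -- unfold one iteration of the loop
    simp only [altLoop, if_neg (by omega : ¬ N < 10)]
    rw [rev_eq (PySem.Int.toChars N) (PySem.List.len (PySem.Int.toChars N))]
    rw [hlen, hk']
    -- unfold A twice: the main branch, then the %10==0 branch at 10^k
    rw [calc_py]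
    have hNsucc : N.toNat = (N.toNat - 1) + 1 := by omega
    simp only [calcGo, if_neg (by omega : ¬ N < 10), if_neg hmod]
    rw [hlen, hk', hparse]
    simp only [Option.getD_some]
    rw [hNsucc]
    simp only [calcGo, if_neg (by omega : ¬ (10 : Int) ^ k < 10), if_pos (mod_pow_ten k hk1)]
    rw [calcGo_fuel ((10 : Int) ^ k - 1).toNat ((10 : Int) ^ k - 1) (N.toNat - 1)
      (le_refl _) (by omega) (by omega)]
    by_cases hk2 : k = 1
    · -- p - 1 = 9: the loop stops, and calc(9) = 9
      subst hk2
      obtain ⟨g, rfl⟩ : ∃ g, f = g + 1 := ⟨f - 1, by omega⟩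
      norm_num [altLoop, calc_py, calcGo]
      ring
    · -- p - 1 ≥ 10: apply the induction hypothesis to the next loop state
      have h100 : (100 : Int) ≤ 10 ^ k := by
        calc (100 : Int) = 10 ^ 2 := by norm_num
        _ ≤ 10 ^ k := pow_le_pow_right₀ (by norm_num) (by omega)
      rw [IH ((10 : Int) ^ k - 1).toNat (by omega) ((10 : Int) ^ k - 1) f _ (le_refl _)
        (by omega) (by omega) (mod_pred_pow_ten k hk1) (by omega)]
      ring

-- ===== VERDICT (by name: the statement is the Claim_ definition above) =====
theorem calc_py_spec : Claim_equal_calc_py := by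
  intro N hD
  unfold Spec_calc_py
  have hB : N ≤ 2147483648 := by
    have := of_decide_eq_true hD
    omega
  by_cases hlt : N < 10
  · rw [calc_py_alt, if_pos hlt, calc_py]
    simp only [calcGo, if_pos hlt]
  · push Not at hlt
    by_cases hmod : PySem.Int.mod N 10 = 0
    · rw [calc_py_alt, if_neg (by omega), if_pos hmod]
      rw [calc_py]
      simp only [calcGo, if_neg (by omega : ¬ N < 10), if_pos hmod]
      rw [calcGo_fuel (N - 1).toNat (N - 1) N.toNat (le_refl _) (by omega) (by omega)]
      by_cases h10 : N = 10
      · subst h10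
        decide
      · have hmod9 : PySem.Int.mod (N - 1) 10 ≠ 0 := by
          intro h
          rw [PySem.Int.mod_eq_zero_iff_dvd] at h hmod
          have : (10 : Int) ∣ 1 := by simpa using dvd_sub hmod h
          norm_num at this
        rw [altLoop_eq (N - 1).toNat (N - 1) N.toNat 1 (le_refl _) (by omega) (by omega)
          hmod9 (by omega)]
        ring
    · rw [calc_py_alt, if_neg (by omega), if_neg hmod]
      rw [altLoop_eq N.toNat N N.toNat 0 (le_refl _) hlt hB hmod (le_refl _)]
      ring
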